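-- pv_equiv track=rewrite | github.com/lkorczowski/TinnitusEEG | code/zeta/data/datasets.py | _sparse_info_from_file
-- ===== SOURCE A (Python) =====
-- def _sparse_info_from_file(filename, valid_id, separator="_"):
--     """ Return a list of symptoms and conditions based on a list of valid_id keywords and return the filtered
--     filename without the keywords.
--     infos, filtered_filename=_sparse_info_from_file(filename, valid_id, separator="_")
--
--         Parameters
--     ----------
--     filename : str
--         filename without the extension ".*" (you can use filename.split(".")[0])
--     valid_id : list of str
--         the keywords corresponding to symptoms or conditions
--     separator : str
--         the separators between keywords (default: separator="_")
--
--     Returns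
--     -------
--     infos : list
--         a list of symptoms sparsed from filename
--     filtered_filename : str
--         the filtered filename without the symptoms
--     """
--     infos = []
--
--     all_keys = filename.upper().split(separator)
--     for filekey in all_keys:
--         if filekey in valid_id:
--             infos.append(filekey)
--
--     # rebuild file name from non valid_id keys
--     filtered_filename = separator.join(
--         [filekey for ind, filekey in enumerate(all_keys) if filekey not in valid_id]
--     )
--
--     return infos, filtered_filename
-- ===== SOURCE B (Python) =====
-- def _sparse_info_from_file(filename, valid_id, separator="_"):
--     """Hand-rolled streaming tokenizer: scan the uppercased filename once,
--     cutting a token at each separator occurrence and classifying it the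
--     moment it is completed; str.split is never called."""
--     if separator == "":
--         raise ValueError("empty separator")
--     s = filename.upper()
--     n, m = len(s), len(separator)
--     infos = []
--     kept = []
--     cur = ""
--     i = 0
--     while i < n:
--         if s.startswith(separator, i):
--             (infos if cur in valid_id else kept).append(cur)
--             cur = ""
--             i += m
--         else:
--             cur += s[i]
--             i += 1
--     (infos if cur in valid_id else kept).append(cur)
--     return infos, separator.join(kept)
-- ===== Notes on version B (the rewrite author's own statement) =====
-- stated objective: alternative
-- what changed: Replaces A's pipeline (str.split into a token list, then a membership loop plus a separate filtering comprehension over that list) with a hand-rolled streaming tokenizer that scans the uppercased filename once, cuts a token at each separator occurrence, and classifies it into infos/kept the moment it is completed; str.split is never called.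
-- outside the precondition, e.g. on _sparse_info_from_file('a_b', ['A'], ''): A raises ValueError, B raises ValueError
import Mathlib
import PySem

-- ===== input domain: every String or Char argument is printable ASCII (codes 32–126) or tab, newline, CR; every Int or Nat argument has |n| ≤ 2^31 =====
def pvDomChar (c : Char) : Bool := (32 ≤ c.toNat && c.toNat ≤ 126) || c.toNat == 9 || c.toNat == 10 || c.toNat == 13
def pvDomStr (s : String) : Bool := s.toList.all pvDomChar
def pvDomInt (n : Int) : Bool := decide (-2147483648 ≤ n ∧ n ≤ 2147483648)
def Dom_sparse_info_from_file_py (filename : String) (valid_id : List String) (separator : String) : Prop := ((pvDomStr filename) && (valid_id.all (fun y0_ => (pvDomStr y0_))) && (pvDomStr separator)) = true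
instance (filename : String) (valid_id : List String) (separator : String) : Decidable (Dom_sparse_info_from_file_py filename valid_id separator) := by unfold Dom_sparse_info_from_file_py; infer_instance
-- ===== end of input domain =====

-- B replaces A's split-then-two-passes pipeline by a hand-rolled streaming tokenizer
-- (one scan of the string, classifying each token as it is completed); same result (alternative).

-- ===== PORT A =====
def sparse_info_from_file_py (filename : String) (valid_id : List String) (separator : String) : List String × String :=
  let all_keys := (PySem.Str.split? (PySem.Str.upper filename) separator).getD []
  let infos := all_keys.foldl (fun acc filekey => if valid_id.contains filekey then acc ++ [filekey] else acc) []
  let filtered_filename := PySem.Str.join separator (all_keys.filter (fun filekey => !valid_id.contains filekey))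
  (infos, filtered_filename)

-- ===== PORT B =====
-- Source B's classification of a completed token: '(infos if cur in valid_id else kept).append(cur)'
def pvClassify (valid_id : List String) (tok : String) : List String × List String → List String × List String
  | (infos, kept) => if valid_id.contains tok then (infos ++ [tok], kept) else (infos, kept ++ [tok])

-- Source B's while loop: 'i' advancing over s is rendered as consuming the suffix s[i:] from the front
-- ('s.startswith(separator, i)' = isPrefixOf on the suffix, 'i += m' = drop sep.length, 'i += 1' = one char
-- moved into cur).  The Nat fuel only makes the recursion total (Source B raises before looping when
-- separator = ""); with fuel = s.length + 1 and sep ≠ [] the fuel-0 branch is never reached.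
def pvScan (valid_id : List String) (sep : List Char) : Nat → List Char → List Char → List String × List String → List String × List String
  | 0, s, cur, acc => pvClassify valid_id (String.ofList (cur ++ s)) acc
  | _+1, [], cur, acc => pvClassify valid_id (String.ofList cur) acc
  | fuel+1, c :: rest, cur, acc =>
      if sep.isPrefixOf (c :: rest) then
        pvScan valid_id sep fuel ((c :: rest).drop sep.length) [] (pvClassify valid_id (String.ofList cur) acc)
      else
        pvScan valid_id sep fuel rest (cur ++ [c]) acc

def sparse_info_from_file_py_alt (filename : String) (valid_id : List String) (separator : String) : List String × String :=
  let s := (PySem.Str.upper filename).toList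
  let r := pvScan valid_id separator.toList (s.length + 1) s [] ([], [])
  (r.1, PySem.Str.join separator r.2)

-- ===== PRECONDITION & SPEC =====
-- Pre_ excludes only separator = "", on which Python's str.split (in A) raises ValueError.
def Pre_sparse_info_from_file_py (_filename : String) (_valid_id : List String) (separator : String) : Prop := separator ≠ ""
instance (filename : String) (valid_id : List String) (separator : String) : Decidable (Pre_sparse_info_from_file_py filename valid_id separator) := by unfold Pre_sparse_info_from_file_py; infer_instance
def pvWitness_sparse_info_from_file_py : String × List String × String := ("a_B_c", ["B"], "_")
def Spec_sparse_info_from_file_py (filename : String) (valid_id : List String) (separator : String) (out : List String × String) : Prop := out = sparse_info_from_file_py_alt filename valid_id separator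
instance (filename : String) (valid_id : List String) (separator : String) (out : List String × String) : Decidable (Spec_sparse_info_from_file_py filename valid_id separator out) := by unfold Spec_sparse_info_from_file_py; infer_instance

-- ===== CLAIM (what is proved, stated in full; the proofs are below) =====
def Claim_equal_sparse_info_from_file_py : Prop := ∀ (filename : String) (valid_id : List String) (separator : String), Dom_sparse_info_from_file_py filename valid_id separator → Pre_sparse_info_from_file_py filename valid_id separator → Spec_sparse_info_from_file_py filename valid_id separator (sparse_info_from_file_py filename valid_id separator)

-- ===== LEMMAS AND PROOFS =====
-- splitOn.go over a general accumulator = accumulator (reversed) ++ run from [].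
theorem pvGo_acc (sep : List Char) : ∀ (fuel : Nat) (s rcur : List Char) (acc : List (List Char)),
    PySem.Chars.splitOn.go sep fuel s rcur acc = acc.reverse ++ PySem.Chars.splitOn.go sep fuel s rcur [] := by
  intro fuel
  induction fuel with
  | zero => intro s rcur acc; rw [PySem.Chars.splitOn.go, PySem.Chars.splitOn.go]; simp
  | succ fuel ih =>
      intro s rcur acc
      cases s with
      | nil =>
          rw [PySem.Chars.splitOn.go, PySem.Chars.splitOn.go] <;> simp
      | cons c rest =>
          rw [PySem.Chars.splitOn.go]
          conv_rhs => rw [PySem.Chars.splitOn.go]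
          by_cases h : sep.isPrefixOf (c :: rest)
          · simp only [h, if_true]
            rw [ih _ _ (rcur.reverse :: acc), ih _ _ [rcur.reverse]]
            simp
          · simp only [h]
            exact ih _ _ acc

-- pvScan produces exactly the two membership-filtered buckets of the tokens splitOn.go produces.
theorem pvScan_eq (valid_id : List String) (sep : List Char) :
    ∀ (fuel : Nat) (s cur : List Char) (infos kept : List String),
    pvScan valid_id sep fuel s cur (infos, kept) =
      (infos ++ ((PySem.Chars.splitOn.go sep fuel s cur.reverse []).map String.ofList).filter
          (fun t => valid_id.contains t),
       kept ++ ((PySem.Chars.splitOn.go sep fuel s cur.reverse []).map String.ofList).filter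
          (fun t => !valid_id.contains t)) := by
  intro fuel
  induction fuel with
  | zero =>
      intro s cur infos kept
      rw [PySem.Chars.splitOn.go]
      simp only [pvScan, pvClassify]
      split_ifs with h <;> simp_all
  | succ fuel ih =>
      intro s cur infos kept
      cases s with
      | nil =>
          rw [PySem.Chars.splitOn.go]
          all_goals by_cases h : String.ofList cur ∈ valid_id <;>
            simp [pvScan, pvClassify, h]
      | cons c rest =>
          rw [PySem.Chars.splitOn.go]
          by_cases h : sep.isPrefixOf (c :: rest)
          · simp only [pvScan, h, if_true]
            rw [pvGo_acc sep fuel _ _ [cur.reverse.reverse]]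
            by_cases hm : String.ofList cur ∈ valid_id <;>
              simp [pvClassify, hm, ih]
          · simp only [pvScan, h]
            rw [ih rest (cur ++ [c]) infos kept]
            simp

-- ===== VERDICT (by name: the statement is the Claim_ definition above) =====
theorem sparse_info_from_file_py_spec : Claim_equal_sparse_info_from_file_py := by
  intro filename valid_id separator _ hpre
  have hsep : separator.toList.isEmpty = false := by
    rcases h : separator.toList with _ | _
    · exact absurd (String.toList_eq_nil_iff.mp h) hpre
    · rfl
  unfold Spec_sparse_info_from_file_py sparse_info_from_file_py sparse_info_from_file_py_alt
  simp only [pvScan_eq, PySem.Str.split?, PySem.Chars.split?, hsep, Bool.false_eq_true,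
    if_false, Option.map_some, Option.getD_some, PySem.Chars.splitOn, List.reverse_nil,
    PySem.List.foldl_append_if]
  simp
  exact List.filter_congr (fun t _ => by simp)
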